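-- pv_equiv track=rewrite | github.com/miniproj240701/MovieSentimentRecommendation | 추천시행착오/영화줄거리분석 코드 (Semantic Analysis)3.py | custom_tokenize
-- ===== SOURCE A (Python) =====
-- def custom_tokenize(sentence, custom_vocab):
--     tokens = []
--     start = 0
--     while start < len(sentence):
--         matched = False
--         for word in custom_vocab:
--             if sentence[start:start+len(word)] == word:
--                 tokens.append(word)
--                 start += len(word)
--                 matched = True
--                 break
--         if not matched:
--             tokens.append(sentence[start])
--             start += 1
--     return tokens
-- ===== SOURCE B (Python) =====
-- def custom_tokenize(sentence, custom_vocab):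
--     # Index the vocabulary once by first character (vocab order preserved inside
--     # each bucket), so each position only scans words that could possibly match.
--     buckets = {}
--     for w in custom_vocab:
--         if w:
--             buckets.setdefault(w[0], []).append(w)
--     tokens = []
--     i = 0
--     n = len(sentence)
--     while i < n:
--         c = sentence[i]
--         for w in buckets.get(c, ()):
--             if sentence.startswith(w, i):
--                 tokens.append(w)
--                 i += len(w)
--                 break
--         else:
--             tokens.append(c)
--             i += 1
--     return tokens
-- ===== Notes on version B (the rewrite author's own statement) =====
-- stated objective: faster
-- what changed: B builds a first-character index of the vocabulary once and at each position scans only the bucket of words starting with the current character (using startswith instead of slicing), instead of A's scan of the whole vocabulary with a fresh slice comparison per word at every position.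
-- outside the precondition, e.g. on custom_tokenize('aa', ['a', '']): A returns ['a', 'a'], B returns ['a', 'a']
import Mathlib
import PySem

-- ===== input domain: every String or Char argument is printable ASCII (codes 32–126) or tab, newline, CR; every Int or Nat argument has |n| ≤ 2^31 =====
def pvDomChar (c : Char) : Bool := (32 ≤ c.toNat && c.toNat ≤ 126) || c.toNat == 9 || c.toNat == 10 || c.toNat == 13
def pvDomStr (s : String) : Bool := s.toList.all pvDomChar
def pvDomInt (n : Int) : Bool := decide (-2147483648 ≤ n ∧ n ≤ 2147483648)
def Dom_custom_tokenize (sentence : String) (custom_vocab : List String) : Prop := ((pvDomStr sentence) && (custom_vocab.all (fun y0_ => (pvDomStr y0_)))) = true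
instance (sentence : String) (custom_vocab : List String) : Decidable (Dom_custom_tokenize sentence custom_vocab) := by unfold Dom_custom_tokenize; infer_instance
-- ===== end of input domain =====

-- B indexes the vocabulary once by first character so each position scans only
-- the candidate bucket (objective: faster). Pre_ excludes vocabularies containing
-- "" on a nonempty sentence, where A loops forever (zero-length match, no progress).


-- ===== PORT A =====
-- inner `for word in custom_vocab` loop: first word with sentence[start:start+len word] == word
def pvFirstMatchA (vocab : List (List Char)) (rest : List Char) : Option (List Char) :=
  match vocab with
  | [] => none
  | w :: ws => if rest.take w.length = w then some w else pvFirstMatchA ws rest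
-- the while loop over `start`, represented by the remaining suffix `rest`;
-- fuel bounds the iteration count (under Pre_ each iteration consumes ≥ 1 char,
-- so fuel = sentence.length makes this exact)
def pvGoA (vocab : List (List Char)) (fuel : Nat) (rest : List Char) : List (List Char) :=
  match fuel, rest with
  | 0, _ => []
  | _, [] => []
  | fuel + 1, c :: rs =>
    match pvFirstMatchA vocab (c :: rs) with
    | some w => w :: pvGoA vocab fuel ((c :: rs).drop w.length)
    | none => [c] :: pvGoA vocab fuel rs

def custom_tokenize (sentence : String) (custom_vocab : List String) : List String :=
  (pvGoA (custom_vocab.map String.toList) sentence.toList.length sentence.toList).map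
    (fun t => String.ofList t)

-- ===== PORT B =====
-- buckets.setdefault(w[0], []).append(w): append w to the bucket of its first char
def pvBucketAdd (d : List (Char × List (List Char))) (c : Char) (w : List Char) :
    List (Char × List (List Char)) :=
  match d with
  | [] => [(c, [w])]
  | (k, b) :: rest => if k = c then (k, b ++ [w]) :: rest else (k, b) :: pvBucketAdd rest c w
-- the index-building for loop (skips empty words, as `if w:` does)
def pvAddWord (d : List (Char × List (List Char))) (w : List Char) :
    List (Char × List (List Char)) :=
  match w with
  | [] => d
  | c :: _ => pvBucketAdd d c w
-- buckets.get(c, ())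
def pvBucketGet (d : List (Char × List (List Char))) (c : Char) : List (List Char) :=
  match d with
  | [] => []
  | (k, b) :: rest => if k = c then b else pvBucketGet rest c
-- inner `for w in buckets.get(c, ())` loop with sentence.startswith(w, i)
def pvFirstMatchB (bucket : List (List Char)) (rest : List Char) : Option (List Char) :=
  match bucket with
  | [] => none
  | w :: ws => if w.isPrefixOf rest then some w else pvFirstMatchB ws rest
-- the while loop of B (same fuel representation of the index loop as in port A)
def pvGoB (d : List (Char × List (List Char))) (fuel : Nat) (rest : List Char) :
    List (List Char) :=
  match fuel, rest with
  | 0, _ => []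
  | _, [] => []
  | fuel + 1, c :: rs =>
    match pvFirstMatchB (pvBucketGet d c) (c :: rs) with
    | some w => w :: pvGoB d fuel ((c :: rs).drop w.length)
    | none => [c] :: pvGoB d fuel rs

def custom_tokenize_alt (sentence : String) (custom_vocab : List String) : List String :=
  (pvGoB ((custom_vocab.map String.toList).foldl pvAddWord []) sentence.toList.length
      sentence.toList).map (fun t => String.ofList t)

-- ===== PRECONDITION & SPEC =====
-- Pre_ excludes vocabularies containing the empty string on a nonempty sentence:
-- on such inputs A loops forever whenever "" becomes the first matching word at
-- some position (zero-length match, `start` never advances); a few such inputs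
-- where an earlier vocab word happens to match at every position still terminate,
-- but whether A returns there depends on the run of the loop, not on a
-- closed-form shape of the input, so the whole region is excluded.
def Pre_custom_tokenize (sentence : String) (custom_vocab : List String) : Prop :=
  sentence = "" ∨ ¬ ("" ∈ custom_vocab)
instance (sentence : String) (custom_vocab : List String) : Decidable (Pre_custom_tokenize sentence custom_vocab) := by unfold Pre_custom_tokenize; infer_instance

def pvWitness_custom_tokenize : String × List String := ("abcab d", ["ab", "c", " "])

def Spec_custom_tokenize (sentence : String) (custom_vocab : List String) (out : List String) : Prop := out = custom_tokenize_alt sentence custom_vocab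
instance (sentence : String) (custom_vocab : List String) (out : List String) : Decidable (Spec_custom_tokenize sentence custom_vocab out) := by unfold Spec_custom_tokenize; infer_instance

-- ===== CLAIM (what is proved, stated in full; the proofs are below) =====
def Claim_equal_custom_tokenize : Prop := ∀ (sentence : String) (custom_vocab : List String), Dom_custom_tokenize sentence custom_vocab → Pre_custom_tokenize sentence custom_vocab → Spec_custom_tokenize sentence custom_vocab (custom_tokenize sentence custom_vocab)

-- ===== LEMMAS AND PROOFS =====

theorem pvBucketGet_add (d : List (Char × List (List Char))) (c c' : Char) (w : List Char) :
    pvBucketGet (pvBucketAdd d c w) c' =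
      if c = c' then pvBucketGet d c' ++ [w] else pvBucketGet d c' := by
  induction d with
  | nil => by_cases h : c = c' <;> simp [pvBucketAdd, pvBucketGet, h]
  | cons kb rest ih =>
    obtain ⟨k, b⟩ := kb
    by_cases hk : k = c
    · by_cases h : c = c' <;> simp [pvBucketAdd, pvBucketGet, hk, h]
    · by_cases hk' : k = c'
      · subst hk'
        have h : ¬ c = k := fun e => hk e.symm
        simp [pvBucketAdd, pvBucketGet, hk, h]
      · simp [pvBucketAdd, pvBucketGet, hk, hk', ih]

-- head-of-word filter characterizing a bucket
def pvHeadIs (c : Char) (w : List Char) : Bool :=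
  match w with
  | [] => false
  | d :: _ => d = c

theorem pvBucketGet_foldl (ws : List (List Char)) (d : List (Char × List (List Char)))
    (c : Char) :
    pvBucketGet (ws.foldl pvAddWord d) c = pvBucketGet d c ++ ws.filter (pvHeadIs c) := by
  induction ws generalizing d with
  | nil => simp
  | cons w ws ih =>
    match w with
    | [] => simp [pvAddWord, ih, pvHeadIs, List.filter]
    | a :: t =>
      by_cases h : a = c
      · simp [pvAddWord, ih, pvBucketGet_add, pvHeadIs, h, List.filter]
      · simp [pvAddWord, ih, pvBucketGet_add, pvHeadIs, h, List.filter]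

-- scanning the whole vocabulary equals scanning only the words whose head is c,
-- provided no word is empty
theorem pvFirstMatch_filter (vocab : List (List Char)) (c : Char) (rs : List Char)
    (hne : ∀ w ∈ vocab, w ≠ []) :
    pvFirstMatchA vocab (c :: rs) = pvFirstMatchB (vocab.filter (pvHeadIs c)) (c :: rs) := by
  induction vocab with
  | nil => simp [pvFirstMatchA, pvFirstMatchB]
  | cons w ws ih =>
    have hws : ∀ u ∈ ws, u ≠ [] := fun u hu => hne u (List.mem_cons_of_mem _ hu)
    match w, hne w List.mem_cons_self with
    | a :: t, _ =>
      have hA : (List.take (a :: t).length (c :: rs) = a :: t) ↔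
          (c = a ∧ List.take t.length rs = t) := by
        simp [List.take_succ_cons]
      have hB : ((a :: t).isPrefixOf (c :: rs) = true) ↔
          (c = a ∧ List.take t.length rs = t) := by
        rw [List.isPrefixOf_iff_prefix, List.cons_prefix_cons, List.prefix_iff_eq_take]
        constructor <;> rintro ⟨h1, h2⟩ <;> exact ⟨h1.symm, h2.symm⟩
      by_cases hc : c = a
      · subst hc
        have hf : List.filter (pvHeadIs c) ((c :: t) :: ws)
            = (c :: t) :: List.filter (pvHeadIs c) ws := by
          simp [pvHeadIs]
        rw [hf]
        by_cases hm : List.take t.length rs = t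
        · simp only [pvFirstMatchA, pvFirstMatchB]
          rw [if_pos (hA.mpr ⟨rfl, hm⟩), if_pos (hB.mpr ⟨rfl, hm⟩)]
        · simp only [pvFirstMatchA, pvFirstMatchB]
          rw [if_neg (fun h => hm (hA.mp h).2), if_neg (fun h => hm (hB.mp h).2)]
          exact ih hws
      · have hf : List.filter (pvHeadIs c) ((a :: t) :: ws) = List.filter (pvHeadIs c) ws := by
          simp [List.filter_cons, pvHeadIs]
          exact fun h => hc h.symm
        rw [hf]
        simp only [pvFirstMatchA]
        rw [if_neg (fun h => hc (hA.mp h).1)]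
        exact ih hws

theorem pvGoA_eq_goB (vocab : List (List Char)) (hne : ∀ w ∈ vocab, w ≠ [])
    (fuel : Nat) (rest : List Char) :
    pvGoA vocab fuel rest = pvGoB (vocab.foldl pvAddWord []) fuel rest := by
  induction fuel generalizing rest with
  | zero => simp [pvGoA, pvGoB]
  | succ n ih =>
    match rest with
    | [] => simp [pvGoA, pvGoB]
    | c :: rs =>
      have hget : pvBucketGet (vocab.foldl pvAddWord []) c = vocab.filter (pvHeadIs c) := by
        simpa [pvBucketGet] using pvBucketGet_foldl vocab [] c
      rw [pvGoA, pvGoB, hget, ← pvFirstMatch_filter vocab c rs hne]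
      cases pvFirstMatchA vocab (c :: rs) with
      | none => simp [ih]
      | some w => simp [ih]

-- ===== VERDICT (by name: the statement is the Claim_ definition above) =====
theorem custom_tokenize_spec : Claim_equal_custom_tokenize := by
  intro sentence custom_vocab _ hpre
  unfold Spec_custom_tokenize custom_tokenize custom_tokenize_alt
  rcases hpre with h | h
  · subst h
    simp [pvGoA, pvGoB]
  · have hne : ∀ w ∈ custom_vocab.map String.toList, w ≠ [] := by
      intro w hw
      simp only [List.mem_map] at hw
      obtain ⟨s, hs, rfl⟩ := hw
      intro he
      apply h
      exact (String.toList_eq_nil_iff.mp he) ▸ hs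
    rw [pvGoA_eq_goB _ hne]
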